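-- pv_equiv track=rewrite | github.com/exastro-suite/exastro-it-automation | ita_root/ita_api_organization/libs/menu_info.py | add_tmp_column_group
-- ===== SOURCE A (Python) =====
-- def add_tmp_column_group(column_group_list, col_group_record_count, column_group_id, col_num, tmp_column_group, column_group_parent_of_child):
--     """
--         カラムグループ管理用配列にカラムグループの親子関係の情報を格納する
--         ARGS:
--             column_group_list: カラムグループのレコード一覧
--             col_group_record_count: カラムグループのレコード数
--             column_group_id: 対象のカラムグループID
--             col_num: カラムの並び順をc1, c2, c3...という名称に変換した値
--             tmp_colmn_group: カラムグループ管理用配列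
--             column_group_parent_of_child: カラムグループの親子関係があるとき、子の一番大きい親を結びつけるための配列
--         RETRUN:
--             tmp_colmn_group, column_group_parent_of_child
--     """
--     if column_group_id not in tmp_column_group:
--         tmp_column_group[column_group_id] = []
--
--     tmp_column_group[column_group_id].append(col_num)
--
--     # カラムグループの親をたどり格納
--     end_flag = False
--     target_column_group_id = column_group_id
--     first_column_group_id = column_group_id
--     loop_count = 0
--     max_loop = int(col_group_record_count) ** 2  # 「カラムグループ作成情報」のレコード数の二乗がループ回数の上限
--     while not end_flag:
--         for target in column_group_list.values():
--             if target.get('column_group_id') == target_column_group_id: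
--                 parent_column_group_id = target.get('parent_column_group_id')
--                 if not parent_column_group_id:
--                     end_flag = True
--                     break
--
--                 if parent_column_group_id not in tmp_column_group:
--                     tmp_column_group[parent_column_group_id] = []
--
--                 if target_column_group_id not in tmp_column_group[parent_column_group_id]:
--                     tmp_column_group[parent_column_group_id].append(target_column_group_id)
--
--                 target_column_group_id = parent_column_group_id
--                 column_group_parent_of_child[first_column_group_id] = parent_column_group_id
--
--         # ループ数がmax_loopを超えたら無限ループの可能性が高いため強制終了
--         loop_count += 1
--         if loop_count > max_loop:
--             end_flag = True
--
--     return tmp_column_group, column_group_parent_of_child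
-- ===== SOURCE B (Python) =====
-- def add_tmp_column_group(column_group_list, col_group_record_count, column_group_id, col_num, tmp_column_group, column_group_parent_of_child):
--     # Faster rewrite: index the records by column_group_id once, then walk the
--     # parent chain directly (visited set guards against cycles) instead of
--     # rescanning all records up to count**2 times.
--     # Mutates tmp_column_group / column_group_parent_of_child in place like the original.
--     tmp_column_group.setdefault(column_group_id, []).append(col_num)
--
--     index = {}
--     for rec in column_group_list.values():
--         cid = rec.get('column_group_id')
--         if cid is not None and cid not in index:
--             index[cid] = rec.get('parent_column_group_id')
--
--     child = column_group_id
--     seen = set()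
--     while child not in seen:
--         seen.add(child)
--         parent = index.get(child)
--         if not parent:
--             break
--         bucket = tmp_column_group.setdefault(parent, [])
--         if child not in bucket:
--             bucket.append(child)
--         column_group_parent_of_child[column_group_id] = parent
--         child = parent
--     return tmp_column_group, column_group_parent_of_child
-- ===== Notes on version B (the rewrite author's own statement) =====
-- stated objective: faster
-- what changed: B builds a column_group_id -> parent index in one pass over the records and walks the parent chain directly with a visited set, instead of A's up-to-count**2 rescans of the whole record list.
import Mathlib
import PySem

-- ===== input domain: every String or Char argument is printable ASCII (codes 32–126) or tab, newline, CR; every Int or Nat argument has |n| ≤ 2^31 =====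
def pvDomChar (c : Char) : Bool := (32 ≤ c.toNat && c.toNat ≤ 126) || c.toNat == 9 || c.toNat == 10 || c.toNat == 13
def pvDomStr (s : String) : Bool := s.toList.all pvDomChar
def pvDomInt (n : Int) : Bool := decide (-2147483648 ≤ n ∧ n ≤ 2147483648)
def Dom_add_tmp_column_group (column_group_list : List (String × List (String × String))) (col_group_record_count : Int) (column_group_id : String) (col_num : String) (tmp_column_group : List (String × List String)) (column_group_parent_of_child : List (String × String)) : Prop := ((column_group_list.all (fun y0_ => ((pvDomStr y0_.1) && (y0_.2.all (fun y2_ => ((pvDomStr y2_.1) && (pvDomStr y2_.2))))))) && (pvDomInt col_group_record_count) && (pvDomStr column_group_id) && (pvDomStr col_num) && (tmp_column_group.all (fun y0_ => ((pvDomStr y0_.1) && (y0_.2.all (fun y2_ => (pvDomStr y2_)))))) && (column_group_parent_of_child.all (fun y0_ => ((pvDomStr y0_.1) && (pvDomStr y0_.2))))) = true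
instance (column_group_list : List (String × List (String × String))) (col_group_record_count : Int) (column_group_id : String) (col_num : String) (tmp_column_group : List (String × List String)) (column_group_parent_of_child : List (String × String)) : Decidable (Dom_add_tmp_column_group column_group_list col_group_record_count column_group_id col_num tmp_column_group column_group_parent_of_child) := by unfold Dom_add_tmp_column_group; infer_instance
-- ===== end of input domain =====

-- B replaces A's repeated full scans of the record list (up to count**2 passes) by a
-- one-pass id → parent index and a direct walk up the parent chain (objective: faster).
-- Both Pythons mutate tmp_column_group / column_group_parent_of_child in place in the
-- same way; the equivalence proved here is about the returned pair.

-- shared field getters: rec.get('column_group_id') / rec.get('parent_column_group_id')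
def pvRecCid (rec : List (String × String)) : Option String :=
  (PySem.Dict.mk rec).get? "column_group_id"
def pvRecPar (rec : List (String × String)) : Option String :=
  (PySem.Dict.mk rec).get? "parent_column_group_id"

-- ===== PORT A =====
-- the four lines that put target under tmp_column_group[parent] and record the parent
def pvEdgeA (cgid : String) (tmp : PySem.Dict String (List String)) (poc : PySem.Dict String String)
    (tgt p : String) : PySem.Dict String (List String) × PySem.Dict String String :=
  let tmp1 := if tmp.contains p then tmp else tmp.insert p []
  let cur := tmp1.getD p []
  let tmp2 := if tgt ∈ cur then tmp1 else tmp1.insert p (cur ++ [tgt])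
  (tmp2, poc.insert cgid p)

-- one 'for target in column_group_list.values():' pass (Bool = end_flag set by break)
def pvPassA (cgid : String) : List (List (String × String)) → PySem.Dict String (List String) →
    PySem.Dict String String → String →
    PySem.Dict String (List String) × PySem.Dict String String × String × Bool
  | [], tmp, poc, tgt => (tmp, poc, tgt, false)
  | rec :: rest, tmp, poc, tgt =>
    if pvRecCid rec = some tgt then
      match pvRecPar rec with
      | none => (tmp, poc, tgt, true)
      | some p =>
        if p = "" then (tmp, poc, tgt, true)
        else
          let s := pvEdgeA cgid tmp poc tgt p
          pvPassA cgid rest s.1 s.2 p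
    else pvPassA cgid rest tmp poc tgt

-- 'while not end_flag:' — fuel = max_loop + 1 is exactly the number of passes Python allows
def pvLoopA (cgid : String) (recs : List (List (String × String))) :
    Nat → PySem.Dict String (List String) → PySem.Dict String String → String →
    PySem.Dict String (List String) × PySem.Dict String String
  | 0, tmp, poc, _ => (tmp, poc)
  | fuel + 1, tmp, poc, tgt =>
    let r := pvPassA cgid recs tmp poc tgt
    if r.2.2.2 then (r.1, r.2.1) else pvLoopA cgid recs fuel r.1 r.2.1 r.2.2.1

def add_tmp_column_group (column_group_list : List (String × List (String × String))) (col_group_record_count : Int) (column_group_id : String) (col_num : String) (tmp_column_group : List (String × List String)) (column_group_parent_of_child : List (String × String)) : (List (String × List String)) × (List (String × String)) :=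
  let tmp0 := PySem.Dict.mk tmp_column_group
  let tmp1 := if tmp0.contains column_group_id then tmp0 else tmp0.insert column_group_id []
  let tmp2 := tmp1.insert column_group_id (tmp1.getD column_group_id [] ++ [col_num])
  let maxLoop := (col_group_record_count ^ 2).toNat   -- max_loop = int(count) ** 2
  let r := pvLoopA column_group_id (column_group_list.map Prod.snd) (maxLoop + 1) tmp2
      (PySem.Dict.mk column_group_parent_of_child) column_group_id
  (r.1.items, r.2.items)

-- ===== PORT B =====
-- 'index[cid] = rec.get("parent_column_group_id")' for the first record of each cid
def pvIndexB : List (List (String × String)) → PySem.Dict String (Option String) →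
    PySem.Dict String (Option String)
  | [], idx => idx
  | rec :: rest, idx =>
    match pvRecCid rec with
    | none => pvIndexB rest idx
    | some cid => pvIndexB rest (if idx.contains cid then idx else idx.insert cid (pvRecPar rec))

-- 'while child not in seen:' — the visited set bounds the loop by len(records) + 2 iterations
def pvWalkB (cgid : String) (idx : PySem.Dict String (Option String)) :
    Nat → PySem.Set String → String → PySem.Dict String (List String) → PySem.Dict String String →
    PySem.Dict String (List String) × PySem.Dict String String
  | 0, _, _, tmp, poc => (tmp, poc)
  | fuel + 1, seen, child, tmp, poc =>
    if PySem.Set.contains seen child then (tmp, poc)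
    else
      let seen' := PySem.Set.add seen child
      match idx.getD child none with
      | none => (tmp, poc)
      | some p =>
        if p = "" then (tmp, poc)
        else
          let tmp' := PySem.Dict.setdefault tmp p []
          let bucket := tmp'.getD p []
          let tmp'' := if child ∈ bucket then tmp' else tmp'.insert p (bucket ++ [child])
          pvWalkB cgid idx fuel seen' p tmp'' (poc.insert cgid p)

def add_tmp_column_group_alt (column_group_list : List (String × List (String × String))) (col_group_record_count : Int) (column_group_id : String) (col_num : String) (tmp_column_group : List (String × List String)) (column_group_parent_of_child : List (String × String)) : (List (String × List String)) × (List (String × String)) :=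
  let tmp0 := PySem.Dict.setdefault (PySem.Dict.mk tmp_column_group) column_group_id []
  let tmp1 := tmp0.insert column_group_id (tmp0.getD column_group_id [] ++ [col_num])
  let idx := pvIndexB (column_group_list.map Prod.snd) PySem.Dict.empty
  let r := pvWalkB column_group_id idx (column_group_list.length + 2) PySem.Set.empty
      column_group_id tmp1 (PySem.Dict.mk column_group_parent_of_child)
  (r.1.items, r.2.items)

-- ===== PRECONDITION & SPEC =====
-- first record whose 'column_group_id' equals id, and its truthy parent (A's lookup step)
def pvLookup (recs : List (List (String × String))) (id : String) : Option (List (String × String)) :=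
  recs.find? (fun r => pvRecCid r == some id)

def pvParentNext (recs : List (List (String × String))) (id : String) : Option String :=
  match pvLookup recs id with
  | none => none
  | some r =>
    match pvRecPar r with
    | none => none
    | some p => if p = "" then none else some p

def pvChainAt (recs : List (List (String × String))) : Nat → String → Option String
  | 0, id => some id
  | k + 1, id =>
    match pvParentNext recs id with
    | none => none
    | some p => pvChainAt recs k p

def pvCidCount (recs : List (List (String × String))) (x : String) : Nat :=
  recs.countP (fun r => pvRecCid r == some x)

def pvChainOK (recs : List (List (String × String))) (start : String) (c : Int) (k : Nat) : Bool :=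
  decide ((k : Int) ≤ c ^ 2) &&
  (match pvChainAt recs k start with
   | none => false
   | some u => decide (pvParentNext recs u = none)) &&
  ((List.range (k + 1)).all (fun i =>
     match pvChainAt recs i start with
     | none => true
     | some x => decide (pvCidCount recs x ≤ 1)))

-- Pre_ excludes inputs where A's value is an artefact of its count**2 loop cap (a parent
-- chain that cycles, or a chain longer than the cap, which A abandons mid-walk) and inputs
-- where some column-group id on the chain occurs in two records (which record A follows
-- then depends on its scan position); it requires the parent chain from column_group_id to
-- stop, within the cap, at an id with no record or with an empty parent.
def Pre_add_tmp_column_group (column_group_list : List (String × List (String × String))) (col_group_record_count : Int) (column_group_id : String) (col_num : String) (tmp_column_group : List (String × List String)) (column_group_parent_of_child : List (String × String)) : Prop :=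
  (List.range (column_group_list.length + 1)).any
    (pvChainOK (column_group_list.map Prod.snd) column_group_id col_group_record_count) = true
instance (column_group_list : List (String × List (String × String))) (col_group_record_count : Int) (column_group_id : String) (col_num : String) (tmp_column_group : List (String × List String)) (column_group_parent_of_child : List (String × String)) : Decidable (Pre_add_tmp_column_group column_group_list col_group_record_count column_group_id col_num tmp_column_group column_group_parent_of_child) := by unfold Pre_add_tmp_column_group; infer_instance

def pvWitness_add_tmp_column_group : (List (String × List (String × String))) × Int × String × String × (List (String × List String)) × (List (String × String)) :=
  ([("1", [("column_group_id", "g1"), ("parent_column_group_id", "g2")]),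
    ("2", [("column_group_id", "g2"), ("parent_column_group_id", "")])],
   2, "g1", "c1", [], [])

def Spec_add_tmp_column_group (column_group_list : List (String × List (String × String))) (col_group_record_count : Int) (column_group_id : String) (col_num : String) (tmp_column_group : List (String × List String)) (column_group_parent_of_child : List (String × String)) (out : (List (String × List String)) × (List (String × String))) : Prop := out = add_tmp_column_group_alt column_group_list col_group_record_count column_group_id col_num tmp_column_group column_group_parent_of_child
instance (column_group_list : List (String × List (String × String))) (col_group_record_count : Int) (column_group_id : String) (col_num : String) (tmp_column_group : List (String × List String)) (column_group_parent_of_child : List (String × String)) (out : (List (String × List String)) × (List (String × String))) : Decidable (Spec_add_tmp_column_group column_group_list col_group_record_count column_group_id col_num tmp_column_group column_group_parent_of_child out) := by unfold Spec_add_tmp_column_group; infer_instance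

-- ===== CLAIM (what is proved, stated in full; the proofs are below) =====
def Claim_equal_add_tmp_column_group : Prop := ∀ (column_group_list : List (String × List (String × String))) (col_group_record_count : Int) (column_group_id : String) (col_num : String) (tmp_column_group : List (String × List String)) (column_group_parent_of_child : List (String × String)), Dom_add_tmp_column_group column_group_list col_group_record_count column_group_id col_num tmp_column_group column_group_parent_of_child → Pre_add_tmp_column_group column_group_list col_group_record_count column_group_id col_num tmp_column_group column_group_parent_of_child → Spec_add_tmp_column_group column_group_list col_group_record_count column_group_id col_num tmp_column_group column_group_parent_of_child (add_tmp_column_group column_group_list col_group_record_count column_group_id col_num tmp_column_group column_group_parent_of_child)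

-- ===== LEMMAS AND PROOFS =====

-- the shared semantics both loops compute: apply the chain's edges, at most k of them
def pvCA (cgid : String) (recs : List (List (String × String))) :
    Nat → String → PySem.Dict String (List String) × PySem.Dict String String →
    PySem.Dict String (List String) × PySem.Dict String String
  | 0, _, S => S
  | k + 1, t, S =>
    match pvParentNext recs t with
    | none => S
    | some p => pvCA cgid recs k p (pvEdgeA cgid S.1 S.2 t p)

theorem pvChainAt_add (recs : List (List (String × String))) (a b : Nat) (t : String) :
    pvChainAt recs (a + b) t =
      (match pvChainAt recs a t with | none => none | some x => pvChainAt recs b x) := by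
  induction a generalizing t with
  | zero => simp [pvChainAt]
  | succ a ih =>
    have : a + 1 + b = (a + b) + 1 := by omega
    rw [this]
    simp only [pvChainAt]
    cases h : pvParentNext recs t with
    | none => rfl
    | some p => exact ih p

theorem pvChainAt_isSome_of_le (recs : List (List (String × String))) {m n : Nat} {t : String}
    (h : m ≤ n) (hn : (pvChainAt recs n t).isSome) : (pvChainAt recs m t).isSome := by
  have hnm : n = m + (n - m) := by omega
  rw [hnm, pvChainAt_add] at hn
  cases hm : pvChainAt recs m t with
  | none => rw [hm] at hn; simp at hn
  | some x => simp

theorem pvStop_unique (recs : List (List (String × String))) {j m : Nat} {t u x : String}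
    (hj : pvChainAt recs j t = some u) (hu : pvParentNext recs u = none)
    (hm : pvChainAt recs m t = some x) (hx : pvParentNext recs x = none) : m = j := by
  rcases lt_trichotomy m j with h | h | h
  · exfalso
    have h1 : pvChainAt recs (m + 1) t = none := by
      rw [pvChainAt_add, hm]
      simp [pvChainAt, hx]
    have h2 : (pvChainAt recs (m + 1) t).isSome := by
      apply pvChainAt_isSome_of_le recs (by omega : m + 1 ≤ j)
      rw [hj]; simp
    rw [h1] at h2; simp at h2
  · exact h
  · exfalso
    have h1 : pvChainAt recs (j + 1) t = none := by
      rw [pvChainAt_add, hj]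
      simp [pvChainAt, hu]
    have h2 : (pvChainAt recs (j + 1) t).isSome := by
      apply pvChainAt_isSome_of_le recs (by omega : j + 1 ≤ m)
      rw [hm]; simp
    rw [h1] at h2; simp at h2

theorem pvChain_inj (recs : List (List (String × String))) {j a b : Nat} {t u x : String}
    (hj : pvChainAt recs j t = some u) (hu : pvParentNext recs u = none)
    (ha : a ≤ j) (hb : b ≤ j)
    (hax : pvChainAt recs a t = some x) (hbx : pvChainAt recs b t = some x) : a = b := by
  have h1 : pvChainAt recs (j - a) x = some u := by
    have h : pvChainAt recs (a + (j - a)) t = some u := by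
      rw [(by omega : a + (j - a) = j)]; exact hj
    rw [pvChainAt_add, hax] at h; exact h
  have h2 : pvChainAt recs (j - b) x = some u := by
    have h : pvChainAt recs (b + (j - b)) t = some u := by
      rw [(by omega : b + (j - b) = j)]; exact hj
    rw [pvChainAt_add, hbx] at h; exact h
  have := pvStop_unique recs h1 hu h2 hu
  omega

theorem pvFind?_of_countP_le_one {α : Type} (l : List α) (p : α → Bool) (r : α)
    (hmem : r ∈ l) (hp : p r = true) (hc : l.countP p ≤ 1) : l.find? p = some r := by
  induction l with
  | nil => simp at hmem
  | cons a rest ih =>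
    rcases List.mem_cons.mp hmem with h | h
    · subst h; simp [List.find?, hp]
    · cases hpa : p a with
      | false =>
        rw [List.find?_cons_of_neg (by simp [hpa])]
        exact ih h (by rw [List.countP_cons, hpa] at hc; simpa using hc)
      | true =>
        exfalso
        rw [List.countP_cons, hpa, if_pos rfl] at hc
        have h0 : rest.countP p = 0 := by omega
        exact (List.countP_eq_zero.mp h0 r h) hp

theorem pvSetdefault_eq (d : PySem.Dict String (List String)) (k : String) (v : List String) :
    PySem.Dict.setdefault d k v = if d.contains k then d else d.insert k v := by
  unfold PySem.Dict.setdefault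
  split_ifs with h
  · rfl
  · exact PySem.Dict.ext (PySem.Dict.items_insert_of_not_contains d v (by simpa using h)).symm

theorem pvCA_add (cgid : String) (recs : List (List (String × String))) (m n : Nat) :
    ∀ (t t' : String) S, pvChainAt recs m t = some t' →
      pvCA cgid recs (m + n) t S = pvCA cgid recs n t' (pvCA cgid recs m t S) := by
  induction m with
  | zero =>
    intro t t' S h
    simp only [pvChainAt] at h
    cases h
    simp [pvCA]
  | succ m ih =>
    intro t t' S h
    simp only [pvChainAt] at h
    cases hpn : pvParentNext recs t with
    | none => rw [hpn] at h; cases h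
    | some p =>
      rw [hpn] at h
      have hstep : m + 1 + n = (m + n) + 1 := by omega
      rw [hstep]
      simp only [pvCA, hpn]
      exact ih p t' (pvEdgeA cgid S.1 S.2 t p) h

theorem pvPassA_spec (cgid : String) (recs : List (List (String × String))) :
    ∀ (rs : List (List (String × String))), rs.Sublist recs →
    ∀ (j : Nat) (t u : String) (tmp : PySem.Dict String (List String)) (poc : PySem.Dict String String),
      pvChainAt recs j t = some u → pvParentNext recs u = none →
      (∀ i x, i ≤ j → pvChainAt recs i t = some x → pvCidCount recs x ≤ 1) →
      ∃ (m : Nat) (t' : String) (e : Bool),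
        m ≤ j ∧ pvChainAt recs m t = some t' ∧
        pvPassA cgid rs tmp poc t =
          ((pvCA cgid recs m t (tmp, poc)).1, (pvCA cgid recs m t (tmp, poc)).2, t', e) ∧
        (e = true → pvParentNext recs t' = none) ∧
        (e = false → m = 0 → ∀ r ∈ rs, pvRecCid r ≠ some t) := by
  intro rs
  induction rs with
  | nil =>
    intro hsub j t u tmp poc hj hu huniq
    refine ⟨0, t, false, Nat.zero_le j, rfl, rfl, ?_, ?_⟩
    · intro h; cases h
    · intro _ _ r hr; cases hr
  | cons rec rest ih =>
    intro hsub j t u tmp poc hj hu huniq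
    have hsub' : rest.Sublist recs := (List.sublist_cons_self rec rest).trans hsub
    by_cases h : pvRecCid rec = some t
    · have hrecmem : rec ∈ recs := hsub.subset List.mem_cons_self
      have hcnt : pvCidCount recs t ≤ 1 := huniq 0 t (Nat.zero_le j) rfl
      have hlook : pvLookup recs t = some rec :=
        pvFind?_of_countP_le_one recs _ rec hrecmem (by simp [h]) hcnt
      cases hp : pvRecPar rec with
      | none =>
        have hpn : pvParentNext recs t = none := by simp [pvParentNext, hlook, hp]
        refine ⟨0, t, true, Nat.zero_le j, rfl, by simp [pvPassA, h, hp, pvCA],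
          fun _ => hpn, ?_⟩
        intro hfalse; cases hfalse
      | some p =>
        by_cases hpe : p = ""
        · have hpn : pvParentNext recs t = none := by
            simp [pvParentNext, hlook, hp, hpe]
          refine ⟨0, t, true, Nat.zero_le j, rfl, ?_, fun _ => hpn,
            by intro hfalse; cases hfalse⟩
          subst hpe
          simp [pvPassA, h, hp, pvCA]
        · have hpn : pvParentNext recs t = some p := by
            simp [pvParentNext, hlook, hp, hpe]
          cases j with
          | zero =>
            exfalso
            simp only [pvChainAt] at hj
            cases hj
            rw [hpn] at hu
            cases hu
          | succ jj =>
            have hj' : pvChainAt recs jj p = some u := by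
              simp only [pvChainAt, hpn] at hj; exact hj
            have huniq' : ∀ i x, i ≤ jj → pvChainAt recs i p = some x →
                pvCidCount recs x ≤ 1 := by
              intro i x hi hx
              exact huniq (i + 1) x (by omega) (by simp only [pvChainAt, hpn]; exact hx)
            obtain ⟨m, t', e, hm, hcm, heq, he, h0⟩ :=
              ih hsub' jj p u (pvEdgeA cgid tmp poc t p).1 (pvEdgeA cgid tmp poc t p).2
                hj' hu huniq'
            refine ⟨m + 1, t', e, by omega, ?_, ?_, he, ?_⟩
            · simp only [pvChainAt, hpn]; exact hcm
            · simp only [pvPassA, if_pos h, hp, if_neg hpe]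
              rw [heq]
              simp only [pvCA, hpn]
            · intro _ hm0
              exact absurd hm0 (Nat.succ_ne_zero m)
    · obtain ⟨m, t', e, hm, hcm, heq, he, h0⟩ := ih hsub' j t u tmp poc hj hu huniq
      refine ⟨m, t', e, hm, hcm, ?_, he, ?_⟩
      · simp only [pvPassA, if_neg h]
        exact heq
      · intro he0 hm0 r hr
        rcases List.mem_cons.mp hr with rfl | hr
        · exact h
        · exact h0 he0 hm0 r hr

theorem pvLoopA_eq (cgid : String) (recs : List (List (String × String))) :
    ∀ (fuel j : Nat) (t u : String) (S : PySem.Dict String (List String) × PySem.Dict String String),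
      pvChainAt recs j t = some u → pvParentNext recs u = none →
      (∀ i x, i ≤ j → pvChainAt recs i t = some x → pvCidCount recs x ≤ 1) →
      j ≤ fuel →
      pvLoopA cgid recs fuel S.1 S.2 t = pvCA cgid recs j t S := by
  intro fuel
  induction fuel with
  | zero =>
    intro j t u S hj hu huniq hle
    have hj0 : j = 0 := by omega
    subst hj0
    simp [pvLoopA, pvCA]
  | succ fuel ih =>
    intro j t u S hj hu huniq hle
    obtain ⟨m, t', e, hm, hcm, heq, he, h0⟩ :=
      pvPassA_spec cgid recs recs (List.Sublist.refl recs) j t u S.1 S.2 hj hu huniq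
    cases e with
    | true =>
      have hm_eq : m = j := pvStop_unique recs hj hu hcm (he rfl)
      subst hm_eq
      simp only [pvLoopA, heq]
      simp
    | false =>
      have hj0 : m = 0 → j = 0 := by
        intro hm0
        by_contra hne
        have hjpos : 1 ≤ j := by omega
        have h1 : (pvChainAt recs 1 t).isSome :=
          pvChainAt_isSome_of_le recs hjpos (by rw [hj]; simp)
        cases hpt : pvParentNext recs t with
        | none => simp [pvChainAt, hpt] at h1
        | some p =>
          have hlk' : ∃ r, pvLookup recs t = some r := by
            cases hlk : pvLookup recs t with
            | none => simp [pvParentNext, hlk] at hpt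
            | some r => exact ⟨r, rfl⟩
          obtain ⟨r, hlk⟩ := hlk'
          unfold pvLookup at hlk
          have hrm : r ∈ recs := List.mem_of_find?_eq_some hlk
          have hpr := List.find?_some hlk
          simp only [beq_iff_eq] at hpr
          exact h0 rfl hm0 r hrm hpr
      have hjm : j - m ≤ fuel := by
        rcases Nat.eq_zero_or_pos m with h' | h'
        · have := hj0 h'; omega
        · omega
      have hchain' : pvChainAt recs (j - m) t' = some u := by
        have hsplit : pvChainAt recs (m + (j - m)) t = some u := by
          rw [(by omega : m + (j - m) = j)]; exact hj
        rw [pvChainAt_add, hcm] at hsplit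
        exact hsplit
      have huniq' : ∀ i x, i ≤ j - m → pvChainAt recs i t' = some x →
          pvCidCount recs x ≤ 1 := by
        intro i x hi hx
        apply huniq (m + i) x (by omega)
        rw [pvChainAt_add, hcm]
        exact hx
      have hrec := ih (j - m) t' u (pvCA cgid recs m t S) hchain' hu huniq' hjm
      simp only [pvLoopA, heq]
      simp only [Bool.false_eq_true, if_false]
      have hca : pvCA cgid recs m t (S.1, S.2) = pvCA cgid recs m t S := by simp
      rw [hca]
      rw [show (pvCA cgid recs m t S).1 = (pvCA cgid recs m t S).1 from rfl]
      have hgoal := pvCA_add cgid recs m (j - m) t t' S hcm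
      rw [(by omega : m + (j - m) = j)] at hgoal
      rw [hgoal]
      exact hrec

theorem pvIndexB_getD : ∀ (recs : List (List (String × String))) (acc : PySem.Dict String (Option String)) (x : String),
    (pvIndexB recs acc).getD x none =
      if acc.contains x then acc.getD x none else (pvLookup recs x).bind pvRecPar := by
  intro recs
  induction recs with
  | nil =>
    intro acc x
    cases hac : acc.contains x with
    | true => simp [pvIndexB]
    | false => simp [pvIndexB, pvLookup, PySem.Dict.getD_of_not_contains acc none hac]
  | cons rec rest ih =>
    intro acc x
    cases hc : pvRecCid rec with
    | none =>
      have hlk : pvLookup (rec :: rest) x = pvLookup rest x := by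
        unfold pvLookup
        rw [List.find?_cons_of_neg (by simp [hc])]
      simp only [pvIndexB, hc, hlk]
      exact ih acc x
    | some cid =>
      by_cases hx : cid = x
      · subst hx
        have hlk : pvLookup (rec :: rest) cid = some rec := by
          unfold pvLookup
          rw [List.find?_cons_of_pos (by simp [hc])]
        simp only [pvIndexB, hc, hlk]
        cases hac : acc.contains cid with
        | true => rw [if_pos rfl, ih acc cid, if_pos hac, if_pos rfl]
        | false =>
          rw [if_neg (by simp), ih (acc.insert cid (pvRecPar rec)) cid,
              if_pos (PySem.Dict.contains_insert_self acc cid (pvRecPar rec)),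
              PySem.Dict.getD_insert_self]
          rfl
      · have hlk : pvLookup (rec :: rest) x = pvLookup rest x := by
          unfold pvLookup
          rw [List.find?_cons_of_neg (by simp [hc, hx])]
        simp only [pvIndexB, hc, hlk]
        cases hac : acc.contains cid with
        | true => rw [if_pos rfl]; exact ih acc x
        | false =>
          rw [if_neg (by simp), ih (acc.insert cid (pvRecPar rec)) x,
              PySem.Dict.contains_insert, PySem.Dict.getD_insert_of_ne acc (pvRecPar rec) none (Ne.symm hx)]
          have hbx : (x == cid) = false := by simp [Ne.symm hx]
          rw [hbx]
          rfl

theorem pvSetContains_eq_false {s : PySem.Set String} {x : String} :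
    PySem.Set.contains s x = false ↔ x ∉ s := by
  rw [PySem.Set.contains_eq_listContains]
  simp

theorem pvWalkB_eq (cgid : String) (recs : List (List (String × String)))
    (idx : PySem.Dict String (Option String))
    (hidx : ∀ x, idx.getD x none = (pvLookup recs x).bind pvRecPar) :
    ∀ (j fuel : Nat) (t u : String) (seen : PySem.Set String)
      (S : PySem.Dict String (List String) × PySem.Dict String String),
      pvChainAt recs j t = some u → pvParentNext recs u = none → j < fuel →
      (∀ i x, i ≤ j → pvChainAt recs i t = some x → PySem.Set.contains seen x = false) →
      pvWalkB cgid idx fuel seen t S.1 S.2 = pvCA cgid recs j t S := by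
  intro j
  induction j with
  | zero =>
    intro fuel t u seen S hch hpn hfuel hseen
    simp only [pvChainAt] at hch
    cases hch
    cases fuel with
    | zero => omega
    | succ f =>
      simp only [pvWalkB]
      rw [hseen 0 t (le_refl 0) rfl, if_neg Bool.false_ne_true]
      have hbt := hidx t
      have hnone : idx.getD t none = none ∨ idx.getD t none = some "" := by
        cases hlk : pvLookup recs t with
        | none => left; rw [hbt, hlk]; rfl
        | some r =>
          cases hpr : pvRecPar r with
          | none => left; rw [hbt, hlk]; simpa using hpr
          | some p =>
            simp only [pvParentNext, hlk, hpr] at hpn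
            by_cases hp : p = ""
            · right; subst hp; rw [hbt, hlk]; simpa using hpr
            · rw [if_neg hp] at hpn; cases hpn
      rcases hnone with hn | hn
      · rw [hn]; simp [pvCA]
      · rw [hn]; simp [pvCA]
  | succ j ih =>
    intro fuel t u seen S hch hpn hfuel hseen
    simp only [pvChainAt] at hch
    cases hpn2 : pvParentNext recs t with
    | none => simp [hpn2] at hch
    | some p =>
      simp only [hpn2] at hch
      have hch0 : pvChainAt recs (j + 1) t = some u := by
        simp only [pvChainAt, hpn2]; exact hch
      cases fuel with
      | zero => omega
      | succ f =>
        simp only [pvWalkB]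
        rw [hseen 0 t (by omega) rfl, if_neg Bool.false_ne_true]
        have hp' : idx.getD t none = some p ∧ ¬ p = "" := by
          have hbt := hidx t
          cases hlk : pvLookup recs t with
          | none => simp only [pvParentNext, hlk] at hpn2; cases hpn2
          | some r =>
            cases hpr : pvRecPar r with
            | none => simp only [pvParentNext, hlk, hpr] at hpn2; cases hpn2
            | some q =>
              simp only [pvParentNext, hlk, hpr] at hpn2
              by_cases hq : q = ""
              · rw [if_pos hq] at hpn2; cases hpn2
              · rw [if_neg hq] at hpn2
                injection hpn2 with hqp
                subst hqp
                exact ⟨by rw [hbt, hlk]; simpa using hpr, hq⟩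
        simp only [hp'.1, if_neg hp'.2, pvSetdefault_eq]
        have hseen' : ∀ i x, i ≤ j → pvChainAt recs i p = some x →
            PySem.Set.contains (PySem.Set.add seen t) x = false := by
          intro i x hi hx
          have hx1 : pvChainAt recs (i + 1) t = some x := by
            simp only [pvChainAt, hpn2]; exact hx
          have hns : x ∉ seen :=
            pvSetContains_eq_false.mp (hseen (i + 1) x (by omega) hx1)
          have hnt : x ≠ t := by
            intro he
            have h0 : pvChainAt recs 0 t = some x := by rw [he]; rfl
            have := pvChain_inj recs hch0 hpn (by omega : i + 1 ≤ j + 1)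
              (by omega : 0 ≤ j + 1) hx1 h0
            omega
          exact pvSetContains_eq_false.mpr (by
            rw [PySem.Set.mem_add]
            rintro (hmem | rfl)
            · exact hns hmem
            · exact hnt rfl)
        have hrec := ih f p u (PySem.Set.add seen t) (pvEdgeA cgid S.1 S.2 t p)
          hch hpn (by omega) hseen'
        simp only [pvCA, hpn2]
        simpa [pvEdgeA] using hrec

-- ===== VERDICT (by name: the statement is the Claim_ definition above) =====
theorem add_tmp_column_group_spec : Claim_equal_add_tmp_column_group := by
  intro cgl c cgid col tmp poc _hdom hpre
  unfold Spec_add_tmp_column_group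
  unfold Pre_add_tmp_column_group at hpre
  rw [List.any_eq_true] at hpre
  obtain ⟨k, hkmem, hOK⟩ := hpre
  rw [List.mem_range] at hkmem
  unfold pvChainOK at hOK
  rw [Bool.and_eq_true, Bool.and_eq_true] at hOK
  obtain ⟨⟨hkc, hstop⟩, hall⟩ := hOK
  rw [decide_eq_true_eq] at hkc
  obtain ⟨u, hchain, hupar⟩ : ∃ u, pvChainAt (cgl.map Prod.snd) k cgid = some u ∧
      pvParentNext (cgl.map Prod.snd) u = none := by
    cases hc2 : pvChainAt (cgl.map Prod.snd) k cgid with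
    | none => simp only [hc2] at hstop; cases hstop
    | some u =>
      simp only [hc2, decide_eq_true_eq] at hstop
      exact ⟨u, rfl, hstop⟩
  have huniq : ∀ i x, i ≤ k → pvChainAt (cgl.map Prod.snd) i cgid = some x →
      pvCidCount (cgl.map Prod.snd) x ≤ 1 := by
    intro i x hi hx
    have hmem : i ∈ List.range (k + 1) := List.mem_range.mpr (by omega)
    have h1 := List.all_eq_true.mp hall i hmem
    simp only [hx, decide_eq_true_eq] at h1
    exact h1
  have hidx : ∀ x, (pvIndexB (cgl.map Prod.snd) PySem.Dict.empty).getD x none =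
      (pvLookup (cgl.map Prod.snd) x).bind pvRecPar := by
    intro x
    rw [pvIndexB_getD]
    simp [PySem.Dict.contains_empty]
  simp only [add_tmp_column_group, add_tmp_column_group_alt, pvSetdefault_eq]
  have hloop := pvLoopA_eq cgid (cgl.map Prod.snd) ((c ^ 2).toNat + 1) k cgid u
    (((if (PySem.Dict.mk tmp).contains cgid then PySem.Dict.mk tmp
       else (PySem.Dict.mk tmp).insert cgid []).insert cgid
        ((if (PySem.Dict.mk tmp).contains cgid then PySem.Dict.mk tmp
          else (PySem.Dict.mk tmp).insert cgid []).getD cgid [] ++ [col])),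
     PySem.Dict.mk poc)
    hchain hupar huniq (by omega)
  have hwalk := pvWalkB_eq cgid (cgl.map Prod.snd) (pvIndexB (cgl.map Prod.snd) PySem.Dict.empty)
    hidx k (cgl.length + 2) cgid u PySem.Set.empty
    (((if (PySem.Dict.mk tmp).contains cgid then PySem.Dict.mk tmp
       else (PySem.Dict.mk tmp).insert cgid []).insert cgid
        ((if (PySem.Dict.mk tmp).contains cgid then PySem.Dict.mk tmp
          else (PySem.Dict.mk tmp).insert cgid []).getD cgid [] ++ [col])),
     PySem.Dict.mk poc)
    hchain hupar (by simpa using (by omega : k < cgl.length + 2))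
    (by intro i x _ _; rfl)
  rw [hloop, hwalk]
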